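-- pv_equiv track=rewrite | github.com/NeNorvalls/NIST_compliant_password_validator | password_validator.py | _has_simple_sequence
-- ===== SOURCE A (Python) =====
-- def _has_simple_sequence(pw: str) -> bool:
--     """
--     Detects simple 3+ length ascending sequences like 'abc', '123', 'qwe' (linear).
--     NOTE: This is a heuristic and *not* part of NIST core requirements.
--     """
--     if len(pw) < 3:
--         return False
--
--     s = pw.lower()
--
--     # numeric straight sequences
--     digits = "0123456789"
--     # alpha straight sequences
--     alpha = "abcdefghijklmnopqrstuvwxyz"
--
--     for i in range(len(s) - 2):
--         chunk = s[i:i+3]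
--         if chunk in digits or chunk in alpha:
--             return True
--         # Also check longer sequences by sliding
--         if len(s) >= 4 and i + 4 <= len(s):
--             chunk4 = s[i:i+4]
--             if chunk4 in digits or chunk4 in alpha:
--                 return True
--     return False
-- ===== SOURCE B (Python) =====
-- def _has_simple_sequence(pw: str) -> bool:
--     """Linear single-pass run-counter over adjacent same-class successor pairs."""
--     if len(pw) < 3:
--         return False
--     s = pw.lower()
--     run = 1
--     for i in range(1, len(s)):
--         a, b = s[i - 1], s[i]
--         if ((a.isdigit() and b.isdigit()) or (a.islower() and b.islower())) \
--                 and ord(b) == ord(a) + 1: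
--             run += 1
--             if run >= 3:
--                 return True
--         else:
--             run = 1
--     return False
-- ===== Notes on version B (the rewrite author's own statement) =====
-- stated objective: simpler
-- what changed: Replaces A's re-scan of overlapping 3- and 4-char windows with substring-membership tests against the digit/alphabet strings by a single linear pass that keeps a run counter over adjacent same-class (digit/digit or lowercase/lowercase) successor pairs and returns True as soon as the run reaches 3.
import Mathlib
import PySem

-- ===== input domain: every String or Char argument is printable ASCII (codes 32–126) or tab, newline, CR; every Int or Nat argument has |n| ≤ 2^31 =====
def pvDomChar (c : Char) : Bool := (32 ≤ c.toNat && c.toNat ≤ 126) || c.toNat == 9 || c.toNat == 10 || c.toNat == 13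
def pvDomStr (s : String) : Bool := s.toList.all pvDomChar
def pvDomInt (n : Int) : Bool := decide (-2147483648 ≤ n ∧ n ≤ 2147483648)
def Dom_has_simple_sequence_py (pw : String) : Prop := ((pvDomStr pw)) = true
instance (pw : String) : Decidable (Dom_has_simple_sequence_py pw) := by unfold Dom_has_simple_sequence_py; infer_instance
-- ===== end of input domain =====

-- B replaces A's overlapping 3- and 4-char substring-membership windows by a single linear
-- run-counter pass over adjacent same-class successor pairs (objective: simpler decomposition).

-- ===== PORT A =====
-- Python's substring test `chunk in digits` is PySem.Str.isIn; the for-loop carries no state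
-- besides its early `return True`, so it is List.any over the same range.
def has_simple_sequence_py (pw : String) : Bool :=
  if PySem.Str.len pw < 3 then false
  else
    (PySem.List.pyRange 0 (PySem.Str.len (PySem.Str.lower pw) - 2) 1).any (fun i =>
      if PySem.Str.isIn (PySem.Str.slice (PySem.Str.lower pw) (some i) (some (i + 3))) "0123456789"
         || PySem.Str.isIn (PySem.Str.slice (PySem.Str.lower pw) (some i) (some (i + 3))) "abcdefghijklmnopqrstuvwxyz" then true
      else if decide (4 ≤ PySem.Str.len (PySem.Str.lower pw)) && decide (i + 4 ≤ PySem.Str.len (PySem.Str.lower pw)) then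
        PySem.Str.isIn (PySem.Str.slice (PySem.Str.lower pw) (some i) (some (i + 4))) "0123456789"
        || PySem.Str.isIn (PySem.Str.slice (PySem.Str.lower pw) (some i) (some (i + 4))) "abcdefghijklmnopqrstuvwxyz"
      else false)

-- ===== PORT B =====
-- Source B's pair test: same class (both digits or both lowercase letters) and ord(b) == ord(a)+1
-- (Python's single-char isdigit()/islower() are exact as PySem.Chars.isdigit/islower on the ASCII domain).
def altGood (a b : Char) : Bool :=
  ((PySem.Chars.isdigit a && PySem.Chars.isdigit b)
    || (PySem.Chars.islower a && PySem.Chars.islower b))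
  && (b.toNat == a.toNat + 1)

-- Source B's loop `for i in range(1, len(s))` walking the pairs (s[i-1], s[i]) with the run counter.
def altScan : Char → Nat → List Char → Bool
  | _, _, [] => false
  | p, run, c :: rest =>
    if altGood p c then
      if 3 ≤ run + 1 then true else altScan c (run + 1) rest
    else altScan c 1 rest

def has_simple_sequence_py_alt (pw : String) : Bool :=
  if PySem.Str.len pw < 3 then false
  else
    match (PySem.Str.lower pw).toList with
    | [] => false
    | a :: rest => altScan a 1 rest

-- ===== PRECONDITION & SPEC =====
def Spec_has_simple_sequence_py (pw : String) (out : Bool) : Prop := out = has_simple_sequence_py_alt pw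
instance (pw : String) (out : Bool) : Decidable (Spec_has_simple_sequence_py pw out) := by unfold Spec_has_simple_sequence_py; infer_instance

-- ===== CLAIM (what is proved, stated in full; the proofs are below) =====
def Claim_equal_has_simple_sequence_py : Prop := ∀ (pw : String), Dom_has_simple_sequence_py pw → Spec_has_simple_sequence_py pw (has_simple_sequence_py pw)

-- ===== LEMMAS AND PROOFS =====

theorem char_eq_iff_toNat (a b : Char) : a = b ↔ a.toNat = b.toNat := by
  constructor
  · intro h; rw [h]
  · intro h; exact Char.ext (UInt32.toNat_inj.mp h)

theorem isdigit_iff (a : Char) : PySem.Chars.isdigit a = true ↔ 48 ≤ a.toNat ∧ a.toNat ≤ 57 := by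
  simp only [PySem.Chars.isdigit, Bool.and_eq_true, decide_eq_true_eq, Char.le_def,
    UInt32.le_iff_toNat_le, Char.toNat_val, show '0'.toNat = 48 from rfl, show '9'.toNat = 57 from rfl]

theorem islower_iff (a : Char) : PySem.Chars.islower a = true ↔ 97 ≤ a.toNat ∧ a.toNat ≤ 122 := by
  simp only [PySem.Chars.islower, Bool.and_eq_true, decide_eq_true_eq, Char.le_def,
    UInt32.le_iff_toNat_le, Char.toNat_val, show 'a'.toNat = 97 from rfl, show 'z'.toNat = 122 from rfl]

theorem altGood_iff (a b : Char) : altGood a b = true ↔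
    ((48 ≤ a.toNat ∧ a.toNat ≤ 56 ∧ b.toNat = a.toNat + 1)
      ∨ (97 ≤ a.toNat ∧ a.toNat ≤ 121 ∧ b.toNat = a.toNat + 1)) := by
  simp only [altGood, Bool.and_eq_true, Bool.or_eq_true, isdigit_iff, islower_iff, beq_iff_eq]
  omega

theorem range'_three_infix_range (k n : Nat) (h : k + 3 ≤ n) : List.range' k 3 <:+: List.range n := by
  refine ⟨List.range' 0 k, List.range' (k+3) (n-k-3), ?_⟩
  rw [List.range_eq_range', List.append_assoc]
  have h2 : List.range' k 3 ++ List.range' (k + 3) (n - k - 3) = List.range' k (n - k) := by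
    rw [show n - k = 3 + (n - k - 3) by omega, ← List.range'_append]
    norm_num
  rw [h2, show List.range' 0 n = List.range' 0 (k + (n - k)) by rw [Nat.add_sub_cancel' (by omega)],
    ← List.range'_append]
  norm_num

theorem inf3D (a b c : Char) : [a, b, c] <:+: "0123456789".toList ↔
    (48 ≤ a.toNat ∧ a.toNat ≤ 55 ∧ b.toNat = a.toNat + 1 ∧ c.toNat = b.toNat + 1) := by
  constructor
  · intro h
    simp only [show "0123456789".toList = ['0','1','2','3','4','5','6','7','8','9'] from rfl,
      List.infix_cons_iff, List.cons_prefix_cons, List.nil_prefix, and_true, List.infix_nil,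
      List.prefix_nil, List.cons_ne_nil, and_false, or_false, char_eq_iff_toNat, show '0'.toNat = 48 from rfl, show '1'.toNat = 49 from rfl, show '2'.toNat = 50 from rfl, show '3'.toNat = 51 from rfl, show '4'.toNat = 52 from rfl, show '5'.toNat = 53 from rfl, show '6'.toNat = 54 from rfl, show '7'.toNat = 55 from rfl, show '8'.toNat = 56 from rfl, show '9'.toNat = 57 from rfl] at h
    rcases h with h|h|h|h|h|h|h|h <;> omega
  · rintro ⟨h1, h2, h3, h4⟩
    have hw : [a, b, c] = (List.range' (a.toNat - 48) 3).map (fun j => Char.ofNat (48 + j)) := by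
      simp only [List.range'_succ, List.range'_zero, List.map_cons, List.map_nil,
        show a.toNat - 48 + 1 = a.toNat - 47 by omega, show a.toNat - 47 + 1 = a.toNat - 46 by omega,
        show 48 + (a.toNat - 48) = a.toNat by omega, show 48 + (a.toNat - 47) = b.toNat by omega,
        show 48 + (a.toNat - 46) = c.toNat by omega, Char.ofNat_toNat]
    rw [hw, show "0123456789".toList = (List.range 10).map (fun j => Char.ofNat (48 + j)) by decide]
    exact List.IsInfix.map _ (range'_three_infix_range _ 10 (by omega))

theorem inf3A (a b c : Char) : [a, b, c] <:+: "abcdefghijklmnopqrstuvwxyz".toList ↔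
    (97 ≤ a.toNat ∧ a.toNat ≤ 120 ∧ b.toNat = a.toNat + 1 ∧ c.toNat = b.toNat + 1) := by
  constructor
  · intro h
    simp only [show "abcdefghijklmnopqrstuvwxyz".toList = ['a','b','c','d','e','f','g','h','i','j','k','l','m','n','o','p','q','r','s','t','u','v','w','x','y','z'] from rfl,
      List.infix_cons_iff, List.cons_prefix_cons, List.nil_prefix, and_true, List.infix_nil,
      List.prefix_nil, List.cons_ne_nil, and_false, or_false, char_eq_iff_toNat, show 'a'.toNat = 97 from rfl, show 'b'.toNat = 98 from rfl, show 'c'.toNat = 99 from rfl, show 'd'.toNat = 100 from rfl, show 'e'.toNat = 101 from rfl, show 'f'.toNat = 102 from rfl, show 'g'.toNat = 103 from rfl, show 'h'.toNat = 104 from rfl, show 'i'.toNat = 105 from rfl, show 'j'.toNat = 106 from rfl, show 'k'.toNat = 107 from rfl, show 'l'.toNat = 108 from rfl, show 'm'.toNat = 109 from rfl, show 'n'.toNat = 110 from rfl, show 'o'.toNat = 111 from rfl, show 'p'.toNat = 112 from rfl, show 'q'.toNat = 113 from rfl, show 'r'.toNat = 114 from rfl, show 's'.toNat = 115 from rfl,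 show 't'.toNat = 116 from rfl, show 'u'.toNat = 117 from rfl, show 'v'.toNat = 118 from rfl, show 'w'.toNat = 119 from rfl, show 'x'.toNat = 120 from rfl, show 'y'.toNat = 121 from rfl, show 'z'.toNat = 122 from rfl] at h
    rcases h with h|h|h|h|h|h|h|h|h|h|h|h|h|h|h|h|h|h|h|h|h|h|h|h <;> omega
  · rintro ⟨h1, h2, h3, h4⟩
    have hw : [a, b, c] = (List.range' (a.toNat - 97) 3).map (fun j => Char.ofNat (97 + j)) := by
      simp only [List.range'_succ, List.range'_zero, List.map_cons, List.map_nil,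
        show a.toNat - 97 + 1 = a.toNat - 96 by omega, show a.toNat - 96 + 1 = a.toNat - 95 by omega,
        show 97 + (a.toNat - 97) = a.toNat by omega, show 97 + (a.toNat - 96) = b.toNat by omega,
        show 97 + (a.toNat - 95) = c.toNat by omega, Char.ofNat_toNat]
    rw [hw, show "abcdefghijklmnopqrstuvwxyz".toList = (List.range 26).map (fun j => Char.ofNat (97 + j)) by decide]
    exact List.IsInfix.map _ (range'_three_infix_range _ 26 (by omega))

theorem quad_infix_triple (a b c d : Char) (L : List Char) (h : [a, b, c, d] <:+: L) :
    [a, b, c] <:+: L :=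
  List.IsInfix.trans ⟨[], [d], rfl⟩ h

-- proof-side view: "some window of two consecutive good pairs exists"
def T : List Char → Bool
  | a :: b :: c :: r => (altGood a b && altGood b c) || T (b :: c :: r)
  | _ => false

def good3At (l : List Char) (i : Nat) : Bool :=
  match l.drop i with
  | a :: b :: c :: _ => altGood a b && altGood b c
  | _ => false

theorem scan_eq : ∀ (r : List Char) (a b : Char),
    altScan a 1 (b :: r) = T (a :: b :: r) ∧
    altScan a 2 (b :: r) = (altGood a b || T (a :: b :: r)) := by
  intro r
  induction r with
  | nil =>
    intro a b
    cases h : altGood a b <;> simp [altScan, T, h]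
  | cons c r' ih =>
    intro a b
    refine ⟨?_, ?_⟩
    · cases h : altGood a b
      · rw [altScan, h, if_neg Bool.false_ne_true, (ih b c).1]
        show _ = ((altGood a b && altGood b c) || T (b :: c :: r'))
        rw [h, Bool.false_and, Bool.false_or]
      · rw [altScan, h, if_pos rfl, if_neg (by omega), (ih b c).2]
        show _ = ((altGood a b && altGood b c) || T (b :: c :: r'))
        rw [h, Bool.true_and]
    · cases h : altGood a b
      · rw [altScan, h, if_neg Bool.false_ne_true, (ih b c).1, Bool.false_or]
        show _ = ((altGood a b && altGood b c) || T (b :: c :: r'))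
        rw [h, Bool.false_and, Bool.false_or]
      · rw [altScan, h, if_pos rfl, if_pos (by omega), Bool.true_or]

theorem good3At_shift (a : Char) (l : List Char) (i : Nat) :
    good3At (a :: l) (i + 1) = good3At l i := rfl

theorem anyRange_eq : ∀ l : List Char,
    (List.range (l.length - 2)).any (fun i => good3At l i) = T l := by
  intro l
  induction l using T.induct with
  | case1 a b c r ih =>
    show _ = ((altGood a b && altGood b c) || T (b :: c :: r))
    have hlen : (a :: b :: c :: r).length - 2 = r.length + 1 := by simp
    rw [hlen, List.range_succ_eq_map]
    simp only [List.any_cons, List.any_map]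
    have h0 : good3At (a :: b :: c :: r) 0 = (altGood a b && altGood b c) := by simp [good3At]
    have hrest : (List.range r.length).any ((fun i => good3At (a :: b :: c :: r) i) ∘ Nat.succ)
        = (List.range r.length).any (fun i => good3At (b :: c :: r) i) := by
      apply PySem.List.any_congr_mem
      intro i _
      simp only [Function.comp_apply]
      exact good3At_shift a (b :: c :: r) i
    rw [h0, hrest,
      show List.range r.length = List.range ((b :: c :: r).length - 2) from congrArg List.range (by simp),
      ih]
  | case2 t h =>
    rcases t with _ | ⟨a, _ | ⟨b, _ | ⟨c, r⟩⟩⟩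
    · rfl
    · rfl
    · rfl
    · exact absurd rfl (h a b c r)

theorem drop_three (l : List Char) (k : Nat) (hk : k + 3 ≤ l.length) :
    ∃ a b c t, l.drop k = a :: b :: c :: t := by
  have hlen : (l.drop k).length = l.length - k := List.length_drop
  rcases hd : l.drop k with _ | ⟨a, _ | ⟨b, _ | ⟨c, t⟩⟩⟩
  · rw [hd] at hlen; simp at hlen; omega
  · rw [hd] at hlen; simp at hlen; omega
  · rw [hd] at hlen; simp at hlen; omega
  · exact ⟨a, b, c, t, rfl⟩

theorem chunk_toList (s : String) (k m : Nat) :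
    (PySem.Str.slice s (some (k : Int)) (some ((k : Int) + (m : Int)))).toList
      = (s.toList.drop k).take m := by
  rw [PySem.Str.toList_slice, PySem.Chars.slice_eq_listSlice, PySem.List.slice_natCast_add]

theorem body_eq (s : String) (k : Nat) (h3 : k + 3 ≤ s.toList.length) :
    (if PySem.Str.isIn (PySem.Str.slice s (some (k : Int)) (some ((k : Int) + 3))) "0123456789"
        || PySem.Str.isIn (PySem.Str.slice s (some (k : Int)) (some ((k : Int) + 3))) "abcdefghijklmnopqrstuvwxyz" then true
     else if decide (4 ≤ PySem.Str.len s) && decide ((k : Int) + 4 ≤ PySem.Str.len s) then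
       PySem.Str.isIn (PySem.Str.slice s (some (k : Int)) (some ((k : Int) + 4))) "0123456789"
       || PySem.Str.isIn (PySem.Str.slice s (some (k : Int)) (some ((k : Int) + 4))) "abcdefghijklmnopqrstuvwxyz"
     else false)
    = good3At s.toList k := by
  obtain ⟨a, b, c, t, hd⟩ := drop_three s.toList k h3
  have hch3 : (PySem.Str.slice s (some (k : Int)) (some ((k : Int) + 3))).toList = [a, b, c] := by
    rw [show ((k : Int) + 3) = ((k : Int) + ((3 : Nat) : Int)) by norm_num, chunk_toList, hd]
    rfl
  have hg : good3At s.toList k = (altGood a b && altGood b c) := by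
    simp only [good3At, hd]
  have htrip : [a, b, c] <:+: "0123456789".toList ∨ [a, b, c] <:+: "abcdefghijklmnopqrstuvwxyz".toList
      ↔ (altGood a b && altGood b c) = true := by
    rw [Bool.and_eq_true, inf3D, inf3A, altGood_iff, altGood_iff]
    constructor
    · rintro (⟨h1, h2, h3, h4⟩ | ⟨h1, h2, h3, h4⟩) <;> constructor <;> omega
    · rintro ⟨h1 | h1, h2 | h2⟩
      · left; omega
      · omega
      · omega
      · right; omega
  rw [hg]
  cases hG : (altGood a b && altGood b c) with
  | true =>
    have hin : (PySem.Str.isIn (PySem.Str.slice s (some (k : Int)) (some ((k : Int) + 3))) "0123456789"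
        || PySem.Str.isIn (PySem.Str.slice s (some (k : Int)) (some ((k : Int) + 3))) "abcdefghijklmnopqrstuvwxyz") = true := by
      rw [Bool.or_eq_true]
      rcases htrip.mpr hG with h | h
      · left; rw [PySem.Str.isIn_iff_infix, hch3]; exact h
      · right; rw [PySem.Str.isIn_iff_infix, hch3]; exact h
    rw [hin, if_pos rfl]
  | false =>
    have hnotrip : ¬ ([a, b, c] <:+: "0123456789".toList ∨ [a, b, c] <:+: "abcdefghijklmnopqrstuvwxyz".toList) := by
      intro h; rw [htrip] at h; rw [h] at hG; cases hG
    have hin : (PySem.Str.isIn (PySem.Str.slice s (some (k : Int)) (some ((k : Int) + 3))) "0123456789"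
        || PySem.Str.isIn (PySem.Str.slice s (some (k : Int)) (some ((k : Int) + 3))) "abcdefghijklmnopqrstuvwxyz") = false := by
      rw [Bool.or_eq_false_iff]
      constructor <;> rw [Bool.eq_false_iff] <;> intro h <;> apply hnotrip
      · left; rw [← hch3, ← PySem.Str.isIn_iff_infix]; exact h
      · right; rw [← hch3, ← PySem.Str.isIn_iff_infix]; exact h
    rw [hin, if_neg Bool.false_ne_true]
    cases hguard : (decide (4 ≤ PySem.Str.len s) && decide ((k : Int) + 4 ≤ PySem.Str.len s)) with
    | false => rw [if_neg Bool.false_ne_true]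
    | true =>
      rw [if_pos rfl]
      have hk4 : k + 4 ≤ s.toList.length := by
        rw [Bool.and_eq_true, decide_eq_true_eq, decide_eq_true_eq] at hguard
        have h4 := hguard.2
        rw [PySem.Str.len_eq] at h4
        exact_mod_cast h4
      obtain ⟨d, t'', hdt⟩ : ∃ d t'', t = d :: t'' := by
        rcases t with _ | ⟨d, t''⟩
        · exfalso
          have hlen : (s.toList.drop k).length = s.toList.length - k := List.length_drop
          rw [hd] at hlen
          have h3len : (3 : Nat) = s.toList.length - k := hlen
          omega
        · exact ⟨d, t'', rfl⟩
      have hch4 : (PySem.Str.slice s (some (k : Int)) (some ((k : Int) + 4))).toList = [a, b, c, d] := by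
        rw [show ((k : Int) + 4) = ((k : Int) + ((4 : Nat) : Int)) by norm_num, chunk_toList, hd, hdt]
        rfl
      rw [Bool.or_eq_false_iff]
      constructor <;> rw [Bool.eq_false_iff] <;> intro h <;> apply hnotrip
      · left
        apply quad_infix_triple a b c d
        have hi := (PySem.Str.isIn_iff_infix _ _).mp h
        rw [hch4] at hi
        exact hi
      · right
        apply quad_infix_triple a b c d
        have hi := (PySem.Str.isIn_iff_infix _ _).mp h
        rw [hch4] at hi
        exact hi

theorem main_eq (pw : String) : has_simple_sequence_py pw = has_simple_sequence_py_alt pw := by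
  by_cases hlt : PySem.Str.len pw < 3
  · simp only [has_simple_sequence_py, has_simple_sequence_py_alt, if_pos hlt]
  · have hlow_len : (PySem.Str.lower pw).toList.length = pw.toList.length := by
      rw [PySem.Str.toList_lower, PySem.Chars.lower, List.length_map]
    have hlen3 : 3 ≤ (PySem.Str.lower pw).toList.length := by
      rw [PySem.Str.len_eq] at hlt
      omega
    obtain ⟨a, b, c, r, hL⟩ := drop_three (PySem.Str.lower pw).toList 0 (by omega)
    rw [List.drop_zero] at hL
    simp only [has_simple_sequence_py, has_simple_sequence_py_alt, if_neg hlt]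
    rw [show PySem.Str.len (PySem.Str.lower pw) - 2
          = (((PySem.Str.lower pw).toList.length - 2 : Nat) : Int) by
        rw [PySem.Str.len_eq]; omega]
    rw [PySem.List.pyRange_zero_natCast, List.any_map]
    refine Eq.trans
      (PySem.List.any_congr_mem
        (g := fun k => good3At (PySem.Str.lower pw).toList k) (fun k hk => ?_)) ?_
    · rw [List.mem_range] at hk
      simp only [Function.comp_apply]
      exact body_eq (PySem.Str.lower pw) k (by omega)
    · rw [anyRange_eq, hL]
      exact ((scan_eq (c :: r) a b).1).symm

-- ===== VERDICT (by name: the statement is the Claim_ definition above) =====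
theorem has_simple_sequence_py_spec : Claim_equal_has_simple_sequence_py := by
  intro pw _
  unfold Spec_has_simple_sequence_py
  exact main_eq pw
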